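-- pv_equiv track=rewrite | github.com/isurajpanda/epub-to-html | src/epub_converter/image_processor.py | crc64
-- ===== SOURCE A (Python) =====
-- def crc64(data):
--     """Calculate CRC64-ECMA value for the given data."""
--     # CRC64-ECMA polynomial: 0xC96C5795D7870F42
--     crc = 0xFFFFFFFFFFFFFFFF
--     poly = 0xC96C5795D7870F42
--     table = [0] * 256
--
--     # Generate table
--     for i in range(256):
--         crc = i
--         for _ in range(8):
--             if crc & 1:
--                 crc = (crc >> 1) ^ poly
--             else:
--                 crc = crc >> 1
--         table[i] = crc
--         crc = 0xFFFFFFFFFFFFFFFF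
--
--     # Calculate CRC
--     crc = 0xFFFFFFFFFFFFFFFF
--     for byte in data:
--         crc = (crc >> 8) ^ table[(crc ^ byte) & 0xFF]
--     return crc ^ 0xFFFFFFFFFFFFFFFF
-- ===== SOURCE B (Python) =====
-- def crc64(data):
--     """Calculate CRC64-ECMA value for the given data (bit-at-a-time, no table)."""
--     crc = 0xFFFFFFFFFFFFFFFF
--     poly = 0xC96C5795D7870F42
--     for byte in data:
--         crc ^= byte & 0xFF
--         for _ in range(8):
--             crc = (crc >> 1) ^ poly if crc & 1 else crc >> 1
--     return crc ^ 0xFFFFFFFFFFFFFFFF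
-- ===== Notes on version B (the rewrite author's own statement) =====
-- stated objective: simpler
-- what changed: Replaced the per-call construction of the 256-entry CRC lookup table (and the table-indexing byte loop) with a direct bit-at-a-time computation: each byte is XORed into the running crc and 8 shift/conditional-xor steps are applied, maintaining only the single crc accumulator.
import Mathlib
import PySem

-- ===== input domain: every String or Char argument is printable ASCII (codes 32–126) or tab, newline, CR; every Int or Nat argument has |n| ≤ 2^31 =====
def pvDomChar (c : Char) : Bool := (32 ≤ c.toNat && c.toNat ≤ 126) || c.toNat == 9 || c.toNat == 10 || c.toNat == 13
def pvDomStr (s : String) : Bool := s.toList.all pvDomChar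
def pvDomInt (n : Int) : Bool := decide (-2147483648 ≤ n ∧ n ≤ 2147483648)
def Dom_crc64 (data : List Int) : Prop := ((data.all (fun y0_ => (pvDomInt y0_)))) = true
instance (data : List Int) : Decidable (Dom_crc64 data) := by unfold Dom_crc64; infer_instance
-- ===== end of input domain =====

-- B replaces A's per-call 256-entry lookup table (built with a nested loop, then indexed
-- per byte) by the direct bit-at-a-time CRC computation that keeps only the running crc.

-- ===== PORT A =====
-- table generation loop of A ('table = [0]*256; for i in range(256): crc = i; 8 rounds; table[i] = crc')
def crc64Table : List Int :=
  (PySem.List.pyRange 0 256 1).foldl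
    (fun table i =>
      let crc := (PySem.List.pyRange 0 8 1).foldl
        (fun crc _ =>
          if PySem.Int.band crc 1 ≠ 0 then PySem.Int.bxor (crc >>> (1 : Nat)) 0xC96C5795D7870F42
          else crc >>> (1 : Nat)) i
      table.set i.toNat crc)
    (List.replicate 256 0)

def crc64 (data : List Int) : Int :=
  PySem.Int.bxor
    (data.foldl
      (fun crc byte =>
        PySem.Int.bxor (crc >>> (8 : Nat))
          (PySem.List.pyGetD crc64Table (PySem.Int.band (PySem.Int.bxor crc byte) 255) 0))
      0xFFFFFFFFFFFFFFFF)
    0xFFFFFFFFFFFFFFFF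

-- ===== PORT B =====
def crc64_alt (data : List Int) : Int :=
  PySem.Int.bxor
    (data.foldl
      (fun crc byte =>
        (PySem.List.pyRange 0 8 1).foldl
          (fun c _ =>
            if PySem.Int.band c 1 ≠ 0 then PySem.Int.bxor (c >>> (1 : Nat)) 0xC96C5795D7870F42
            else c >>> (1 : Nat))
          (PySem.Int.bxor crc (PySem.Int.band byte 255)))
      0xFFFFFFFFFFFFFFFF)
    0xFFFFFFFFFFFFFFFF

-- ===== PRECONDITION & SPEC =====
def Spec_crc64 (data : List Int) (out : Int) : Prop := out = crc64_alt data
instance (data : List Int) (out : Int) : Decidable (Spec_crc64 data out) := by unfold Spec_crc64; infer_instance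

-- ===== CLAIM (what is proved, stated in full; the proofs are below) =====
def Claim_equal_crc64 : Prop := ∀ (data : List Int), Dom_crc64 data → Spec_crc64 data (crc64 data)

-- ===== LEMMAS AND PROOFS =====

theorem toNat_255 : (255 : Int).toNat = 255 := rfl

-- Nat model of one CRC round and of n rounds
def roundN (x : Nat) : Nat :=
  if x &&& 1 = 1 then (x >>> 1) ^^^ 0xC96C5795D7870F42 else x >>> 1

def roundsN : Nat → Nat → Nat
  | 0, x => x
  | n + 1, x => roundsN n (roundN x)

theorem testBit_255 (i : Nat) : (255 : Nat).testBit i = decide (i < 8) := by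
  have h := Nat.testBit_two_pow_sub_one 8 i
  norm_num at h
  exact h

theorem roundInt (x : Nat) :
    (if PySem.Int.band (↑x) 1 ≠ 0 then PySem.Int.bxor ((↑x : Int) >>> (1 : Nat)) 0xC96C5795D7870F42
     else (↑x : Int) >>> (1 : Nat)) = ↑(roundN x) := by
  have hp : (0xC96C5795D7870F42 : Int) = ((0xC96C5795D7870F42 : Nat) : Int) := by norm_num
  have hs : ((↑x : Int) >>> (1 : Nat)) = ((x >>> 1 : Nat) : Int) := by
    exact_mod_cast Int.natCast_shiftRight x 1
  have hb : PySem.Int.band (↑x) 1 = ((x &&& 1 : Nat) : Int) := by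
    have := PySem.Int.band_natCast x 1
    simpa using this
  rw [hp, hs, hb]
  unfold roundN
  by_cases hx : x &&& 1 = 1
  · have hne : ((x &&& 1 : Nat) : Int) ≠ 0 := by rw [hx]; norm_num
    rw [if_pos hne, if_pos hx, PySem.Int.bxor_natCast]
  · have h0 : x &&& 1 = 0 := by
      have := Nat.and_one_is_mod x; omega
    have hne : ¬ ((x &&& 1 : Nat) : Int) ≠ 0 := by rw [h0]; norm_num
    rw [if_neg hne, if_neg hx]

theorem innerFold (x : Nat) :
    (PySem.List.pyRange 0 8 1).foldl
      (fun c _ =>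
        if PySem.Int.band c 1 ≠ 0 then PySem.Int.bxor (c >>> (1 : Nat)) 0xC96C5795D7870F42
        else c >>> (1 : Nat)) (↑x) = ↑(roundsN 8 x) := by
  have h8 : PySem.List.pyRange 0 8 1 = [0,1,2,3,4,5,6,7] := by decide
  rw [h8]
  simp only [List.foldl, roundInt]
  rfl

theorem and_one_xor (a b : Nat) : (a ^^^ b) &&& 1 = (a &&& 1) ^^^ (b &&& 1) := by
  apply Nat.eq_of_testBit_eq; intro i
  simp only [Nat.testBit_land, Nat.testBit_xor]
  cases (1:Nat).testBit i <;> cases a.testBit i <;> cases b.testBit i <;> rfl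

theorem shiftLeft_and_one (h n : Nat) : (h <<< (n + 1)) &&& 1 = 0 := by
  rw [Nat.and_one_is_mod, Nat.shiftLeft_eq, Nat.mul_mod, pow_succ]
  simp [Nat.mul_mod]

theorem shiftRight_one_xor (h n l : Nat) :
    ((h <<< (n + 1)) ^^^ l) >>> 1 = (h <<< n) ^^^ (l >>> 1) := by
  apply Nat.eq_of_testBit_eq; intro i
  simp [Nat.testBit_shiftRight, Nat.testBit_xor, Nat.testBit_shiftLeft]
  by_cases hni : n ≤ i
  · have h1 : 1 + i - (n+1) = i - n := by omega
    have h2 : n + 1 ≤ 1 + i := by omega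
    simp [h1, hni, Nat.add_comm 1 i]
  · have h2 : ¬ (n + 1 ≤ 1 + i) := by omega
    simp [hni, Nat.add_comm 1 i]

theorem roundN_shift (n h l : Nat) : roundN ((h <<< (n + 1)) ^^^ l) = (h <<< n) ^^^ roundN l := by
  unfold roundN
  rw [and_one_xor, shiftLeft_and_one, Nat.zero_xor, shiftRight_one_xor]
  split_ifs with hc
  · rw [Nat.xor_assoc]
  · rfl

theorem roundsN_shift (n : Nat) : ∀ h l : Nat, roundsN n ((h <<< n) ^^^ l) = h ^^^ roundsN n l := by
  induction n with
  | zero => intro h l; simp [roundsN, Nat.shiftLeft_zero]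
  | succ n ih =>
    intro h l
    show roundsN n (roundN ((h <<< (n+1)) ^^^ l)) = h ^^^ roundsN n (roundN l)
    rw [roundN_shift, ih]

theorem decomp (y : Nat) : y = ((y >>> 8) <<< 8) ^^^ (y &&& 255) := by
  apply Nat.eq_of_testBit_eq; intro i
  simp only [Nat.testBit_shiftRight, Nat.testBit_xor, Nat.testBit_shiftLeft, Nat.testBit_land, testBit_255]
  by_cases hi : i < 8
  · have : ¬ (8 ≤ i) := by omega
    simp [hi, this]
  · have h8 : 8 ≤ i := by omega
    simp [hi, h8, Nat.add_sub_cancel' h8]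

theorem byteNat (x r : Nat) (hr : r < 256) :
    roundsN 8 (x ^^^ r) = (x >>> 8) ^^^ roundsN 8 ((x ^^^ r) &&& 255) := by
  have hsr : (x ^^^ r) >>> 8 = x >>> 8 := by
    apply Nat.eq_of_testBit_eq; intro i
    simp only [Nat.testBit_shiftRight, Nat.testBit_xor]
    have : r.testBit (8 + i) = false := by
      apply Nat.testBit_lt_two_pow
      calc r < 256 := hr
        _ ≤ 2 ^ (8 + i) := by
          have h2 : (256:Nat) = 2 ^ 8 := by norm_num
          rw [h2]; exact Nat.pow_le_pow_right (by norm_num) (by omega)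
    simp [this]
  conv_lhs => rw [decomp (x ^^^ r)]
  rw [roundsN_shift, hsr]

theorem lowbyte_xor (x y : Nat) : (x ^^^ y) &&& 255 = (x ^^^ (y &&& 255)) &&& 255 := by
  apply Nat.eq_of_testBit_eq; intro i
  simp only [Nat.testBit_land, Nat.testBit_xor, testBit_255]
  cases hd : decide (i < 8) <;> cases x.testBit i <;> cases y.testBit i <;> simp

set_option maxRecDepth 4096 in
theorem sub_255 : ∀ s : Nat, s < 256 → 255 - s = 255 ^^^ s := by decide

theorem lowbyte_neg (x m : Nat) :
    255 ^^^ (255 &&& (x ^^^ m)) = (x ^^^ (255 ^^^ (255 &&& m))) &&& 255 := by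
  apply Nat.eq_of_testBit_eq; intro i
  simp only [Nat.testBit_land, Nat.testBit_xor, testBit_255]
  cases hd : decide (i < 8) <;> cases x.testBit i <;> cases m.testBit i <;> simp

theorem band255_range (b : Int) : 0 ≤ PySem.Int.band b 255 ∧ (PySem.Int.band b 255).toNat < 256 := by
  unfold PySem.Int.band
  by_cases hb : 0 ≤ b
  · simp only [hb, if_true, (by norm_num : (0:Int) ≤ 255), toNat_255]
    have h1 : b.toNat &&& 255 ≤ 255 := Nat.and_le_right
    constructor
    · exact Int.natCast_nonneg _
    · simp; omega
  · simp only [hb, if_false, (by norm_num : (0:Int) ≤ 255), if_true, toNat_255]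
    have h1 : 255 &&& (-b - 1).toNat ≤ 255 := Nat.and_le_left
    constructor
    · exact Int.natCast_nonneg _
    · simp; omega

theorem bandXor (c b : Int) (hc : 0 ≤ c) :
    PySem.Int.band (PySem.Int.bxor c b) 255
      = ↑((c.toNat ^^^ (PySem.Int.band b 255).toNat) &&& 255) := by
  by_cases hb : 0 ≤ b
  · rw [PySem.Int.bxor_of_nonneg hc hb,
      PySem.Int.band_of_nonneg (Int.natCast_nonneg _) (by norm_num : (0:Int) ≤ 255),
      PySem.Int.band_of_nonneg hb (by norm_num : (0:Int) ≤ 255)]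
    simp only [Int.toNat_natCast, toNat_255]
    rw [← lowbyte_xor]
  · have hxorneg : PySem.Int.bxor c b = -((c.toNat ^^^ (-b - 1).toNat : Nat) : Int) - 1 := by
      unfold PySem.Int.bxor
      simp only [hc, hb, if_true, if_false]
    have hbandb : PySem.Int.band b 255 = ((255 ^^^ (255 &&& (-b - 1).toNat) : Nat) : Int) := by
      unfold PySem.Int.band
      simp only [hb, if_false, (by norm_num : (0:Int) ≤ 255), if_true, toNat_255]
      rw [sub_255 (255 &&& (-b - 1).toNat) (Nat.lt_succ_of_le Nat.and_le_left)]
    have hneg : ¬ (0 ≤ -((c.toNat ^^^ (-b - 1).toNat : Nat) : Int) - 1) := by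
      have := Int.natCast_nonneg (c.toNat ^^^ (-b - 1).toNat); omega
    have hlhs : PySem.Int.band (PySem.Int.bxor c b) 255
        = ((255 - (255 &&& (c.toNat ^^^ (-b - 1).toNat)) : Nat) : Int) := by
      rw [hxorneg]
      unfold PySem.Int.band
      simp only [hneg, if_false, (by norm_num : (0:Int) ≤ 255), if_true, toNat_255]
      norm_num
    rw [hlhs, hbandb,
      sub_255 (255 &&& (c.toNat ^^^ (-b - 1).toNat)) (Nat.lt_succ_of_le Nat.and_le_left)]
    simp only [Int.toNat_natCast]
    rw [lowbyte_neg]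

set_option maxRecDepth 100000 in
theorem tableLookup (j : Nat) (hj : j < 256) :
    PySem.List.pyGetD crc64Table (↑j) 0 = ↑(roundsN 8 j) := by
  have h : ∀ j : Nat, j < 256 → crc64Table.getD j 0 = ↑(roundsN 8 j) := by decide
  rw [PySem.List.pyGetD_natCast]
  exact h j hj

theorem stepA (c b : Int) (hc : 0 ≤ c) :
    PySem.Int.bxor (c >>> (8 : Nat))
        (PySem.List.pyGetD crc64Table (PySem.Int.band (PySem.Int.bxor c b) 255) 0)
      = ↑(roundsN 8 (c.toNat ^^^ (PySem.Int.band b 255).toNat)) := by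
  rw [bandXor c b hc]
  rw [tableLookup _ (Nat.lt_succ_of_le Nat.and_le_right)]
  have hcx : c = ((c.toNat : Nat) : Int) := (Int.toNat_of_nonneg hc).symm
  rw [hcx]
  have hs : ((c.toNat : Int)) >>> (8 : Nat) = ((c.toNat >>> 8 : Nat) : Int) := by
    exact_mod_cast Int.natCast_shiftRight c.toNat 8
  rw [hs, PySem.Int.bxor_natCast]
  simp only [Int.toNat_natCast]
  rw [← byteNat c.toNat (PySem.Int.band b 255).toNat (band255_range b).2]

theorem stepB (c b : Int) (hc : 0 ≤ c) :
    (PySem.List.pyRange 0 8 1).foldl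
      (fun c _ =>
        if PySem.Int.band c 1 ≠ 0 then PySem.Int.bxor (c >>> (1 : Nat)) 0xC96C5795D7870F42
        else c >>> (1 : Nat)) (PySem.Int.bxor c (PySem.Int.band b 255))
      = ↑(roundsN 8 (c.toNat ^^^ (PySem.Int.band b 255).toNat)) := by
  have hb0 := (band255_range b).1
  rw [PySem.Int.bxor_of_nonneg hc hb0]
  exact innerFold _

theorem foldAB (data : List Int) : ∀ c : Int, 0 ≤ c →
    data.foldl
      (fun crc byte =>
        PySem.Int.bxor (crc >>> (8 : Nat))
          (PySem.List.pyGetD crc64Table (PySem.Int.band (PySem.Int.bxor crc byte) 255) 0)) c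
    = data.foldl
      (fun crc byte =>
        (PySem.List.pyRange 0 8 1).foldl
          (fun c _ =>
            if PySem.Int.band c 1 ≠ 0 then PySem.Int.bxor (c >>> (1 : Nat)) 0xC96C5795D7870F42
            else c >>> (1 : Nat)) (PySem.Int.bxor crc (PySem.Int.band byte 255))) c := by
  induction data with
  | nil => intro c hc; rfl
  | cons b t ih =>
    intro c hc
    simp only [List.foldl_cons]
    rw [stepA c b hc, stepB c b hc]
    exact ih _ (Int.natCast_nonneg _)

-- ===== VERDICT (by name: the statement is the Claim_ definition above) =====
theorem crc64_spec : Claim_equal_crc64 := by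
  intro data _
  unfold Spec_crc64 crc64 crc64_alt
  rw [foldAB data 0xFFFFFFFFFFFFFFFF (by norm_num)]
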